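-- pv_equiv track=rewrite | github.com/giragon6/counting-bitstrings | bitstring_constraint_counter.py | get_x
-- ===== SOURCE A (Python) =====
-- def next(bitstrings, max_constraint=0, constraints=[]):
--     new_bitstrings = []
--     for b in bitstrings:
--         illegal0=False
--         illegal1=False
--         for c in constraints:
--             cut = b[(-len(c)+1):]
--             if cut+"0" == c:
--                 illegal0=True
--             if cut+"1" == c:
--                 illegal1=True
--         if not illegal0: new_bitstrings.append(b+"0")
--         if not illegal1: new_bitstrings.append(b+"1")
--     return new_bitstrings
--
-- def get_x(n, constraints=[]):
--     MAX_LENGTH_CONSTRAINT=0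
--     if len(constraints) > 0:
--         MAX_LENGTH_CONSTRAINT = max([len(c) for c in constraints])
--     bs = [""]
--     for i in range(n):
--         bs = next(bs, max_constraint=MAX_LENGTH_CONSTRAINT, constraints=constraints)
--     return bs
-- ===== SOURCE B (Python) =====
-- def get_x(n, constraints=[]):
--     results = []
--
--     def dfs(prefix):
--         if len(prefix) >= n:
--             results.append(prefix)
--             return
--         for ch in "01":
--             if not any(prefix[(-len(c)+1):] + ch == c for c in constraints):
--                 dfs(prefix + ch)
--
--     dfs("")
--     return results
-- ===== Notes on version B (the rewrite author's own statement) =====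
-- stated objective: alternative
-- what changed: Replaced the level-by-level BFS (rebuilding the whole list of bitstrings n times via next()) with a recursive DFS over prefixes that extends one prefix at a time and emits completed length-n strings in the same left-to-right order, keeping the exact incremental suffix check.
import Mathlib
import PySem

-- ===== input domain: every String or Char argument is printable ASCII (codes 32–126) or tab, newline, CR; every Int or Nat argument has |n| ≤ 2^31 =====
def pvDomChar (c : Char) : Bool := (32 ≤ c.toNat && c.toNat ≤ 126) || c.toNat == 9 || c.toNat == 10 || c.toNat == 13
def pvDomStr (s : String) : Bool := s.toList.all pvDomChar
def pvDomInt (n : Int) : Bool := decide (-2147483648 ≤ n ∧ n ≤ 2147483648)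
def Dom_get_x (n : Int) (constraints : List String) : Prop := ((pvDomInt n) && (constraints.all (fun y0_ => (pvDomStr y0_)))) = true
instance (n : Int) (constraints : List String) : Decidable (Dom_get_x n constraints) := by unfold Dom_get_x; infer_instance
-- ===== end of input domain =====

-- B rewrites A's level-by-level BFS as a recursive DFS over pfxes with the same
-- incremental suffix check; same output, same order (objective: alternative decomposition).

-- ===== PORT A =====
-- the Python suffix check: b[(-len(c)+1):] + ch == c
def pvCheck (b : String) (ch : String) (c : String) : Bool :=
  PySem.Str.slice b (some (-(PySem.Str.len c) + 1)) none ++ ch == c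

-- port of A's helper `next` (the unused max_constraint parameter kept)
def nextA (bitstrings : List String) (_max_constraint : Int) (constraints : List String) : List String :=
  bitstrings.foldl (fun new_bitstrings b =>
      let st := constraints.foldl (fun (p : Bool × Bool) c =>
          (p.1 || pvCheck b "0" c, p.2 || pvCheck b "1" c)) (false, false)
      (new_bitstrings ++ (if !st.1 then [b ++ "0"] else [])
                      ++ (if !st.2 then [b ++ "1"] else []))) []

def get_x (n : Int) (constraints : List String) : List String :=
  let MAX_LENGTH_CONSTRAINT : Int :=
    if constraints.length > 0 then ((constraints.map PySem.Str.len).max?).getD 0 else 0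
  (PySem.List.pyRange 0 n 1).foldl
    (fun bs _ => nextA bs MAX_LENGTH_CONSTRAINT constraints) [""]

-- ===== PORT B =====
-- DFS over pfxes; fuel = n - len(pfx) (len(pfx) ≥ n ⟺ fuel = 0)
def dfsB (constraints : List String) : Nat → String → List String
  | 0, pfx => [pfx]
  | fuel + 1, pfx =>
      (if !(constraints.any (fun c => pvCheck pfx "0" c)) then
          dfsB constraints fuel (pfx ++ "0") else [])
      ++ (if !(constraints.any (fun c => pvCheck pfx "1" c)) then
          dfsB constraints fuel (pfx ++ "1") else [])

def get_x_alt (n : Int) (constraints : List String) : List String :=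
  dfsB constraints n.toNat ""

-- ===== PRECONDITION & SPEC =====
def Spec_get_x (n : Int) (constraints : List String) (out : List String) : Prop := out = get_x_alt n constraints
instance (n : Int) (constraints : List String) (out : List String) : Decidable (Spec_get_x n constraints out) := by unfold Spec_get_x; infer_instance

-- ===== CLAIM (what is proved, stated in full; the proofs are below) =====
def Claim_equal_get_x : Prop := ∀ (n : Int) (constraints : List String), Dom_get_x n constraints → Spec_get_x n constraints (get_x n constraints)

-- ===== LEMMAS AND PROOFS =====

-- legal one-step children of a pfx, in A's 0-then-1 order
def childL (constraints : List String) (b : String) : List String :=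
  (if !(constraints.any (fun c => pvCheck b "0" c)) then [b ++ "0"] else [])
  ++ (if !(constraints.any (fun c => pvCheck b "1" c)) then [b ++ "1"] else [])

theorem flag_fold (constraints : List String) (b : String) (p : Bool × Bool) :
    constraints.foldl (fun (p : Bool × Bool) c =>
        (p.1 || pvCheck b "0" c, p.2 || pvCheck b "1" c)) p
    = (p.1 || constraints.any (fun c => pvCheck b "0" c),
       p.2 || constraints.any (fun c => pvCheck b "1" c)) := by
  induction constraints generalizing p with
  | nil => simp
  | cons c cs ih => simp [List.foldl_cons, ih, Bool.or_assoc]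

theorem nextA_go (constraints : List String) (l : List String) (acc : List String) :
    l.foldl (fun new_bitstrings b =>
      let st := constraints.foldl (fun (p : Bool × Bool) c =>
          (p.1 || pvCheck b "0" c, p.2 || pvCheck b "1" c)) (false, false)
      (new_bitstrings ++ (if !st.1 then [b ++ "0"] else [])
                      ++ (if !st.2 then [b ++ "1"] else []))) acc
    = acc ++ l.flatMap (childL constraints) := by
  induction l generalizing acc with
  | nil => simp
  | cons b bs ih =>
      rw [List.foldl_cons, ih]
      simp only [List.flatMap_cons, flag_fold, Bool.false_or, childL, List.append_assoc]

theorem nextA_eq_flatMap (constraints : List String) (m : Int) (l : List String) :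
    nextA l m constraints = l.flatMap (childL constraints) := by
  unfold nextA
  rw [nextA_go]
  simp

theorem dfsB_succ_flatMap (constraints : List String) (k : Nat) (b : String) :
    (childL constraints b).flatMap (dfsB constraints k) = dfsB constraints (k + 1) b := by
  unfold childL dfsB
  split_ifs <;> simp

theorem iter_eq_flatMap (constraints : List String) (m : Int) (k : Nat) (l : List String) :
    (List.range k).foldl (fun bs _ => nextA bs m constraints) l
    = l.flatMap (dfsB constraints k) := by
  induction k generalizing l with
  | zero => simp [dfsB]
  | succ k ih =>
      rw [List.range_succ_eq_map]
      simp only [List.foldl_cons]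
      rw [List.foldl_map, ih, nextA_eq_flatMap, List.flatMap_assoc]
      exact List.flatMap_congr (fun b _ => dfsB_succ_flatMap constraints k b)

-- ===== VERDICT (by name: the statement is the Claim_ definition above) =====
theorem get_x_spec : Claim_equal_get_x := by
  intro n constraints _
  show get_x n constraints = get_x_alt n constraints
  unfold get_x get_x_alt
  rw [PySem.List.pyRange_one]
  simp only [Int.sub_zero]
  rw [List.foldl_map, iter_eq_flatMap]
  simp
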